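-- pv_equiv track=rewrite | github.com/dplamen/03_Python_Advanced | 09. Exam Preparation/3_problem.py | best_list_pureness
-- ===== SOURCE A (Python) =====
-- def best_list_pureness(numbers, k):
--     best = 0
--     rotations_count = 0
--     for i in range(k+1):
--         pureness = 0
--         for idx in range(len(numbers)):
--             pureness += numbers[idx] * idx
--         if pureness > best:
--             best = pureness
--             rotations_count = i
--         numbers = numbers[-1:] + numbers[0:-1]
--     return f'Best pureness {best} after {rotations_count} rotations'
-- ===== SOURCE B (Python) =====
-- def best_list_pureness(numbers, k):
--     n = len(numbers)
--     total = sum(numbers)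
--     pureness = sum(i * v for i, v in enumerate(numbers))
--     best = 0
--     rotations_count = 0
--     for i in range(k + 1):
--         if pureness > best:
--             best = pureness
--             rotations_count = i
--         if n:
--             pureness += total - n * numbers[(n - 1 - i) % n]
--     return f'Best pureness {best} after {rotations_count} rotations'
-- ===== Notes on version B (the rewrite author's own statement) =====
-- stated objective: faster
-- what changed: Instead of recomputing the pureness of every rotation with an inner index loop, B computes the initial pureness and total sum once and updates the pureness of each successive right-rotation in O(1) via P' = P + sum - n*last.
import Mathlib
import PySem

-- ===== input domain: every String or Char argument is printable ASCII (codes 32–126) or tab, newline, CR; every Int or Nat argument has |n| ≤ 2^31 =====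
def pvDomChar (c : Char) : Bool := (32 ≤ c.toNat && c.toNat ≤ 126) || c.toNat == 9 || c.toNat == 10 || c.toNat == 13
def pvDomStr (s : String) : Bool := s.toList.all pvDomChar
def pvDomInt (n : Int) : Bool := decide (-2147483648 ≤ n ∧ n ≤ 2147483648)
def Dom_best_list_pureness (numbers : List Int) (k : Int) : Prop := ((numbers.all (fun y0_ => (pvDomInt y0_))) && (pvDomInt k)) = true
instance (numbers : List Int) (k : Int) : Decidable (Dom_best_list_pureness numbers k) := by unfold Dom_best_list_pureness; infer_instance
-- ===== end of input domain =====

-- B replaces A's per-rotation recomputation of the pureness (an inner loop over the whole list)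
-- by an O(1) incremental update per rotation (P' = P + sum - n·last), intended to be faster.

-- ===== PORT A =====
-- loop body of A: recompute pureness of the current list, update best/count, rotate right by one
def pvStepA (st : Int × Int × List Int) (i : Int) : Int × Int × List Int :=
  let pureness := (PySem.List.pyRange 0 (st.2.2.length : Int) 1).foldl
      (fun p idx => p + PySem.List.pyGetD st.2.2 idx 0 * idx) 0
  let bc := if pureness > st.1 then (pureness, i) else (st.1, st.2.1)
  (bc.1, bc.2,
    PySem.List.slice st.2.2 (some (-1)) none ++ PySem.List.slice st.2.2 (some 0) (some (-1)))

def best_list_pureness (numbers : List Int) (k : Int) : String :=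
  let st := (PySem.List.pyRange 0 (k + 1) 1).foldl pvStepA (0, 0, numbers)
  "Best pureness " ++ PySem.Int.toStr st.1 ++ " after " ++ PySem.Int.toStr st.2.1 ++ " rotations"

-- ===== PORT B =====
-- loop body of B: update best/count from the carried pureness, then update it incrementally
def pvStepB (n total : Int) (numbers : List Int) (st : Int × Int × Int) (i : Int) : Int × Int × Int :=
  let bc := if st.2.2 > st.1 then (st.2.2, i) else (st.1, st.2.1)
  let p := if n ≠ 0 then st.2.2 + total - n * PySem.List.pyGetD numbers (PySem.Int.mod (n - 1 - i) n) 0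
           else st.2.2
  (bc.1, bc.2, p)

def best_list_pureness_alt (numbers : List Int) (k : Int) : String :=
  let n : Int := numbers.length
  let total : Int := numbers.sum
  let pureness0 : Int := ((PySem.List.enumerate numbers 0).map (fun p => p.1 * p.2)).sum
  let st := (PySem.List.pyRange 0 (k + 1) 1).foldl (pvStepB n total numbers) (0, 0, pureness0)
  "Best pureness " ++ PySem.Int.toStr st.1 ++ " after " ++ PySem.Int.toStr st.2.1 ++ " rotations"

-- ===== PRECONDITION & SPEC =====
def Spec_best_list_pureness (numbers : List Int) (k : Int) (out : String) : Prop := out = best_list_pureness_alt numbers k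
instance (numbers : List Int) (k : Int) (out : String) : Decidable (Spec_best_list_pureness numbers k out) := by unfold Spec_best_list_pureness; infer_instance

-- ===== CLAIM (what is proved, stated in full; the proofs are below) =====
def Claim_equal_best_list_pureness : Prop := ∀ (numbers : List Int) (k : Int), Dom_best_list_pureness numbers k → Spec_best_list_pureness numbers k (best_list_pureness numbers k)

-- ===== LEMMAS AND PROOFS =====

-- pureness of a list whose first element carries weight m
def purOff (xs : List Int) (m : Int) : Int :=
  match xs with
  | [] => 0
  | x :: t => x * m + purOff t (m + 1)

lemma purOff_append (c d : List Int) (m : Int) :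
    purOff (c ++ d) m = purOff c m + purOff d (m + c.length) := by
  induction c generalizing m with
  | nil => simp [purOff]
  | cons x t ih =>
    simp only [List.cons_append, purOff, ih, List.length_cons, Nat.cast_add, Nat.cast_one]
    rw [show ((m + 1) + (t.length : Int)) = m + ((t.length : Int) + 1) from by ring]
    ring

lemma purOff_shift (xs : List Int) (m t : Int) :
    purOff xs (m + t) = purOff xs m + t * xs.sum := by
  induction xs generalizing m with
  | nil => simp [purOff]
  | cons x xs ih =>
    simp only [purOff, List.sum_cons]
    have := ih (m + 1)
    rw [show m + t + 1 = m + 1 + t by ring, this]; ring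

lemma purSum (xs : List Int) (m : Int) :
    ((List.range xs.length).map (fun k => xs.getD k 0 * (m + (k : Int)))).sum = purOff xs m := by
  induction xs generalizing m with
  | nil => simp [purOff]
  | cons x t ih =>
    rw [List.length_cons, List.range_succ_eq_map]
    simp only [List.map_cons, List.map_map, List.sum_cons, Nat.cast_zero, add_zero,
      List.getD_cons_zero, purOff]
    have : ((List.range t.length).map ((fun k => (x :: t).getD k 0 * (m + (k : Int))) ∘ Nat.succ)).sum
        = ((List.range t.length).map (fun k => t.getD k 0 * ((m + 1) + (k : Int)))).sum := by
      congr 1; apply List.map_congr_left; intro k _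
      show (x :: t).getD (k + 1) 0 * (m + ((k : Int) + 1)) = _
      rw [List.getD_cons_succ]; ring
    rw [this, ih]

lemma purEnum (xs : List Int) (s : Int) :
    ((PySem.List.enumerate xs s).map (fun p => p.1 * p.2)).sum = purOff xs s := by
  induction xs generalizing s with
  | nil => simp [PySem.List.enumerate_nil, purOff]
  | cons x t ih => simp [PySem.List.enumerate_cons, purOff, ih, mul_comm]

-- A's inner loop computes purOff of the current list
lemma innerA (ys : List Int) :
    (PySem.List.pyRange 0 (ys.length : Int) 1).foldl
      (fun p idx => p + PySem.List.pyGetD ys idx 0 * idx) 0 = purOff ys 0 := by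
  rw [PySem.List.foldl_add]
  rw [PySem.List.pyRange_one]
  simp only [sub_zero, Int.toNat_natCast, List.map_map]
  have : ((List.range ys.length).map ((fun idx => PySem.List.pyGetD ys idx 0 * idx) ∘ (fun k : Nat => (0 : Int) + k))).sum
      = ((List.range ys.length).map (fun k => ys.getD k 0 * ((0 : Int) + (k : Int)))).sum := by
    congr 1; apply List.map_congr_left; intro k _
    simp [PySem.List.pyGetD_natCast]
  rw [this, purSum]; simp

-- the rotation invariant: state of A after processing indices < a
def pvRel (numbers : List Int) (a : Int) (sA : Int × Int × List Int) (sB : Int × Int × Int) : Prop :=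
  sA.1 = sB.1 ∧ sA.2.1 = sB.2.1 ∧
  ∃ m : Nat, m < numbers.length ∧ (-a).emod (numbers.length : Int) = (m : Int) ∧
    sA.2.2 = numbers.drop m ++ numbers.take m ∧ sB.2.2 = purOff sA.2.2 0

lemma pvDropAppend (l1 l2 : List Int) : ∀ (n : Nat),
    (l1 ++ l2).drop n = l1.drop n ++ l2.drop (n - l1.length) := by
  induction l1 with
  | nil => intro n; simp
  | cons x t ih =>
    intro n
    cases n with
    | zero => simp
    | succ n =>
      simp only [List.cons_append, List.drop_succ_cons, ih, List.length_cons]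
      congr 2
      omega

lemma drop_take_split (numbers : List Int) (m : Nat) (_hm : 1 ≤ m) (hm2 : m ≤ numbers.length) :
    numbers.drop (m - 1) = (numbers.take m).drop (m - 1) ++ numbers.drop m := by
  conv_lhs => rw [← List.take_append_drop m numbers]
  rw [pvDropAppend]
  have h1 : m - 1 - (numbers.take m).length = 0 := by
    rw [List.length_take]; omega
  rw [h1, List.drop_zero]

lemma rot_drop_take (numbers : List Int) (m : Nat) (hm : m < numbers.length) :
    (numbers.drop m ++ numbers.take m).drop ((numbers.drop m ++ numbers.take m).length - 1)
      ++ (numbers.drop m ++ numbers.take m).dropLast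
    = numbers.drop (if m = 0 then numbers.length - 1 else m - 1)
      ++ numbers.take (if m = 0 then numbers.length - 1 else m - 1) := by
  have hlen : (numbers.drop m ++ numbers.take m).length = numbers.length := by
    simp only [List.length_append, List.length_drop, List.length_take]; omega
  by_cases h0 : m = 0
  · subst h0
    rw [if_pos rfl]
    simp only [List.drop_zero, List.take_zero, List.append_nil]
    rw [List.dropLast_eq_take]
  · rw [if_neg h0, hlen]
    have htm : numbers.take m ≠ [] := by
      intro h
      have := congrArg List.length h
      rw [List.length_take, List.length_nil] at this
      omega
    rw [pvDropAppend]
    have e0 : (numbers.drop m).drop (numbers.length - 1) = [] :=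
      List.drop_eq_nil_of_le (by rw [List.length_drop]; omega)
    have e1 : numbers.length - 1 - (numbers.drop m).length = m - 1 := by
      rw [List.length_drop]; omega
    rw [e0, e1, List.nil_append]
    rw [List.dropLast_append_of_ne_nil htm]
    have e2 : (numbers.take m).dropLast = numbers.take (m - 1) := by
      rw [List.dropLast_eq_take, List.length_take, List.take_take]
      congr 1
      omega
    rw [e2, ← List.append_assoc]
    congr 1
    rw [← drop_take_split numbers m (by omega) (by omega)]

lemma pvDropLast1 : ∀ (l : List Int) (h : l ≠ []), l.drop (l.length - 1) = [l.getLast h] := by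
  intro l
  induction l with
  | nil => intro h; exact absurd rfl h
  | cons x t ih =>
    intro h
    cases t with
    | nil => simp
    | cons y u =>
      have ht : (y :: u) ≠ [] := by simp
      rw [List.length_cons, List.length_cons, Nat.add_sub_cancel, List.drop_succ_cons]
      have hih := ih ht
      rw [List.length_cons, Nat.add_sub_cancel] at hih
      rw [hih]
      congr 1

lemma pur_rot (ys : List Int) (hn : ys ≠ []) :
    purOff (ys.drop (ys.length - 1) ++ ys.dropLast) 0
      = purOff ys 0 + ys.sum - (ys.length : Int) * ys.getLast hn := by
  have hsplit : ys = ys.dropLast ++ [ys.getLast hn] := (List.dropLast_append_getLast hn).symm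
  have hdl : ys.dropLast.length = ys.length - 1 := List.length_dropLast
  have hdrop : ys.drop (ys.length - 1) = [ys.getLast hn] := pvDropLast1 ys hn
  rw [hdrop]
  have h1 : purOff ([ys.getLast hn] ++ ys.dropLast) 0
      = ys.getLast hn * 0 + purOff ys.dropLast 1 := by
    rw [purOff_append]; simp [purOff]
  have h2 : purOff ys.dropLast 1 = purOff ys.dropLast 0 + ys.dropLast.sum := by
    have := purOff_shift ys.dropLast 0 1
    simpa using this
  have h3 : purOff ys 0 = purOff ys.dropLast 0 + ys.getLast hn * (ys.dropLast.length : Int) := by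
    conv_lhs => rw [hsplit]
    rw [purOff_append]; simp [purOff]
  have h4 : ys.sum = ys.dropLast.sum + ys.getLast hn := by
    conv_lhs => rw [hsplit]; simp
  have h5 : (ys.dropLast.length : Int) = (ys.length : Int) - 1 := by
    rw [hdl]
    have : 1 ≤ ys.length := List.length_pos_iff.mpr hn
    omega
  rw [h1, h2, h3, h4, h5]; ring

-- the key step: one loop iteration preserves the invariant and the reported pair
lemma pvStep_rel (numbers : List Int) (hn : numbers ≠ []) (a : Int)
    (sA : Int × Int × List Int) (sB : Int × Int × Int)
    (h : pvRel numbers a sA sB) :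
    pvRel numbers (a + 1) (pvStepA sA a)
      (pvStepB (numbers.length : Int) numbers.sum numbers sB a) := by
  obtain ⟨h1, h2, m, hm, hmod, hys, hp⟩ := h
  set n := numbers.length with hn'
  have hnpos : 0 < n := List.length_pos_iff.mpr hn
  have hmod' : -a % (n : Int) = (m : Int) := hmod
  have hlen : sA.2.2.length = n := by
    rw [hys]; simp only [List.length_append, List.length_drop, List.length_take]; omega
  have hpur : (PySem.List.pyRange 0 (sA.2.2.length : Int) 1).foldl
      (fun p idx => p + PySem.List.pyGetD sA.2.2 idx 0 * idx) 0 = sB.2.2 := by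
    rw [innerA, hp]
  set m' : Nat := if m = 0 then n - 1 else m - 1 with hm'
  have hm'lt : m' < n := by rw [hm']; split <;> omega
  have hne_ys : sA.2.2 ≠ [] := by
    intro h; have := congrArg List.length h; rw [hlen] at this; simp at this; omega
  have hnz : ((n : Int)) ≠ 0 := Int.natCast_ne_zero.mpr hnpos.ne' 
  have hidx : PySem.Int.mod ((n : Int) - 1 - a) n = (((n - 1 + m) % n : Nat) : Int) := by
    rw [PySem.Int.mod_eq_emod_of_pos (by exact_mod_cast hnpos)]
    show ((n : Int) - 1 - a) % n = (((n - 1 + m) % n : Nat) : Int)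
    have e1 : (n : Int) - 1 - a = ((n : Int) - 1) + (-a) := by ring
    rw [e1, Int.add_emod, hmod']
    have e2 : ((n : Int) - 1) % n = (n : Int) - 1 :=
      Int.emod_eq_of_lt (by omega) (by omega)
    rw [e2]
    have e3 : (n : Int) - 1 + m = ((n - 1 + m : Nat) : Int) := by push_cast; omega
    rw [e3]
    exact_mod_cast (Int.natCast_mod (n - 1 + m) n)
  have hidx2 : (n - 1 + m) % n = m' := by
    rw [hm']
    by_cases h0 : m = 0
    · rw [if_pos h0, h0, Nat.add_zero, Nat.mod_eq_of_lt (by omega)]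
    · rw [if_neg h0]
      have e : n - 1 + m = (m - 1) + n := by omega
      rw [e, Nat.add_mod_right, Nat.mod_eq_of_lt (by omega)]
  have hlast : PySem.List.pyGetD numbers (PySem.Int.mod ((n : Int) - 1 - a) n) 0
      = sA.2.2.getLast hne_ys := by
    rw [hidx, hidx2, PySem.List.pyGetD_natCast]
    obtain ⟨X, hX⟩ : ∃ X, sA.2.2.getLast hne_ys = X := ⟨_, rfl⟩
    have hgl : sA.2.2.getLast? = some X := by
      rw [← hX]; exact List.getLast?_eq_some_getLast hne_ys
    rw [hys] at hgl
    rw [hX, List.getD_eq_getElem?_getD]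
    by_cases h0 : m = 0
    · rw [h0] at hgl
      simp only [List.drop_zero, List.take_zero, List.append_nil] at hgl
      rw [List.getLast?_eq_getElem?] at hgl
      have hm'e : m' = numbers.length - 1 := by rw [hm', if_pos h0]
      rw [hm'e, hgl]
      rfl
    · have htm : numbers.take m ≠ [] := by
        intro hh
        have := congrArg List.length hh
        rw [List.length_take, List.length_nil] at this
        omega
      rw [List.getLast?_append_of_ne_nil _ htm, List.getLast?_eq_getElem?] at hgl
      have hlt : (numbers.take m).length - 1 = m - 1 := by
        rw [List.length_take]; omega
      rw [hlt, List.getElem?_take_of_lt (by omega)] at hgl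
      have hm'e : m' = m - 1 := by rw [hm', if_neg h0]
      rw [hm'e, hgl]
      rfl
  have hsum : sA.2.2.sum = numbers.sum := by
    rw [hys, List.sum_append, add_comm, ← List.sum_append, List.take_append_drop]
  refine ⟨?_, ?_, m', hm'lt, ?_, ?_, ?_⟩
  · simp only [pvStepA, pvStepB, hpur, h1, h2]
  · simp only [pvStepA, pvStepB, hpur, h1, h2]
  · show (-(a + 1)) % (n : Int) = (m' : Int)
    have e : (-(a + 1)) = (-a) - 1 := by ring
    rw [e, Int.sub_emod, hmod']
    by_cases hn1 : n = 1
    · have hm0 : m = 0 := by omega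
      rw [hm', hn1, hm0]
      norm_num [Int.emod_one]
    · have hone : (1 : Int) % (n : Int) = 1 := Int.emod_eq_of_lt (by omega) (by omega)
      rw [hone]
      by_cases h0 : m = 0
      · rw [hm', if_pos h0, h0]
        show ((0 : Int) - 1) % n = _
        have e2 : ((0 : Int) - 1) = ((n : Int) - 1) + n * (-1) := by ring
        rw [e2, Int.add_mul_emod_self_left, Int.emod_eq_of_lt (by omega) (by omega)]
        omega
      · rw [hm', if_neg h0]
        rw [Int.emod_eq_of_lt (by omega) (by omega)]
        omega
  · simp only [pvStepA]
    rw [PySem.List.slice_from_neg_one, PySem.List.slice_zero_start, PySem.List.slice_to_neg_one]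
    have hrot := rot_drop_take numbers m hm
    rw [← hys] at hrot
    rw [hrot, hm']
  · simp only [pvStepA, pvStepB, hpur]
    rw [if_pos hnz]
    rw [PySem.List.slice_from_neg_one, PySem.List.slice_zero_start, PySem.List.slice_to_neg_one]
    rw [pur_rot sA.2.2 hne_ys, hp, hlast, hsum, hlen]

lemma pvLoop_rel (numbers : List Int) (hn : numbers ≠ []) :
    ∀ (t : Nat) (a b : Int), (b - a).toNat = t →
    ∀ (sA : Int × Int × List Int) (sB : Int × Int × Int), pvRel numbers a sA sB →
    pvRel numbers b ((PySem.List.pyRange a b 1).foldl pvStepA sA)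
      ((PySem.List.pyRange a b 1).foldl (pvStepB (numbers.length : Int) numbers.sum numbers) sB)
    ∨ ( b ≤ a ∧
      (PySem.List.pyRange a b 1).foldl pvStepA sA = sA ∧
      (PySem.List.pyRange a b 1).foldl (pvStepB (numbers.length : Int) numbers.sum numbers) sB = sB) := by
  intro t
  induction t with
  | zero =>
    intro a b hab sA sB hrel
    right
    have hba : b ≤ a := by omega
    rw [PySem.List.pyRange_one_eq_nil hba]
    exact ⟨hba, rfl, rfl⟩
  | succ t ih =>
    intro a b hab sA sB hrel
    left
    have hba : a < b := by omega
    rw [PySem.List.pyRange_one_cons hba]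
    simp only [List.foldl_cons]
    have hstep := pvStep_rel numbers hn a sA sB hrel
    have := ih (a + 1) b (by omega) _ _ hstep
    rcases this with h | ⟨hle, hA, hB⟩
    · exact h
    · rw [hA, hB]
      have : b = a + 1 := by omega
      rw [this]
      exact hstep

-- the empty-list case: both folds leave their start state unchanged
lemma pvLoopA_nil (l : List Int) : l.foldl pvStepA (0, 0, ([] : List Int)) = (0, 0, []) := by
  induction l with
  | nil => rfl
  | cons x t ih =>
    rw [List.foldl_cons]
    have : pvStepA (0, 0, ([] : List Int)) x = (0, 0, []) := by
      simp [pvStepA, PySem.List.pyRange_one_eq_nil (by omega : (0:Int) ≤ 0),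
        PySem.List.slice_from_neg_one, PySem.List.slice_zero_start, PySem.List.slice_to_neg_one]
    rw [this, ih]

lemma pvLoopB_nil (l : List Int) :
    l.foldl (pvStepB 0 0 []) (0, 0, 0) = (0, 0, 0) := by
  induction l with
  | nil => rfl
  | cons x t ih =>
    rw [List.foldl_cons]
    have : pvStepB 0 0 [] (0, 0, 0) x = (0, 0, 0) := by simp [pvStepB]
    rw [this, ih]

-- ===== VERDICT (by name: the statement is the Claim_ definition above) =====
theorem best_list_pureness_spec : Claim_equal_best_list_pureness := by
  intro numbers k _
  unfold Spec_best_list_pureness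
  simp only [best_list_pureness, best_list_pureness_alt]
  by_cases hn : numbers = []
  · subst hn
    simp only [List.length_nil, Nat.cast_zero, List.sum_nil, PySem.List.enumerate_nil,
      List.map_nil]
    rw [pvLoopA_nil, pvLoopB_nil]
  · have hrel0 : pvRel numbers 0 (0, 0, numbers)
        (0, 0, ((PySem.List.enumerate numbers 0).map (fun p => p.1 * p.2)).sum) := by
      refine ⟨rfl, rfl, 0, List.length_pos_iff.mpr hn, ?_, by simp, ?_⟩
      · show (-(0 : Int)) % (numbers.length : Int) = ((0 : Nat) : Int)
        simp
      · show ((PySem.List.enumerate numbers 0).map (fun p => p.1 * p.2)).sum = purOff numbers 0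
        rw [purEnum]
    have hmain := pvLoop_rel numbers hn (k + 1 - 0).toNat 0 (k + 1) rfl _ _ hrel0
    rcases hmain with ⟨h1, h2, _⟩ | ⟨_, hA, hB⟩
    · rw [h1, h2]
    · rw [hA, hB]
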